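-- pv_equiv track=rewrite | github.com/Commander17X/MeckaLLM | meckallm/examples/app_control.py | is_app_control_prompt
-- ===== SOURCE A (Python) =====
-- def is_app_control_prompt(prompt: str) -> bool:
--     """Check if prompt is related to application control."""
--     prompt = prompt.lower()
--
--     # Common prefixes and variations
--     prefixes = ['ja', 'nee', 'ok', 'oke', 'goed', 'prima', 'start', 'open', 'begin', 'launch']
--
--     # Remove common prefixes
--     for prefix in prefixes:
--         if prompt.startswith(prefix + ' '):
--             prompt = prompt[len(prefix) + 1:]
--
--     # Check for any command pattern
--     command_patterns = {
--         'spotify': ['spotify', 'open spotify', 'start spotify', 'spotify openen'],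
--         'minecraft': ['minecraft', 'open minecraft', 'start minecraft'],
--         'fortnite': ['fortnite', 'open fortnite', 'start fortnite'],
--         'valorant': ['valorant', 'open valorant', 'start valorant'],
--         'brave': ['brave', 'open brave', 'start brave'],
--         'youtube': ['youtube', 'open youtube', 'start youtube']
--     }
--
--     # Check if any command pattern matches
--     for commands in command_patterns.values():
--         if any(cmd in prompt for cmd in commands):
--             return True
--
--     return False
-- ===== SOURCE B (Python) =====
-- def is_app_control_prompt(prompt: str) -> bool:
--     """Check if prompt is related to application control."""
--     p = prompt.lower()
--     return any(name in p
--                for name in ('spotify', 'minecraft', 'fortnite', 'valorant', 'brave', 'youtube'))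
-- ===== Notes on version B (the rewrite author's own statement) =====
-- stated objective: simpler
-- what changed: B replaces A's prefix-stripping loop and nested command-pattern dict with a single membership pass over the six bare app names, which is equivalent because every longer pattern contains the bare name and stripping a space-terminated prefix never removes or creates an occurrence of a space-free app name.
import Mathlib
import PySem

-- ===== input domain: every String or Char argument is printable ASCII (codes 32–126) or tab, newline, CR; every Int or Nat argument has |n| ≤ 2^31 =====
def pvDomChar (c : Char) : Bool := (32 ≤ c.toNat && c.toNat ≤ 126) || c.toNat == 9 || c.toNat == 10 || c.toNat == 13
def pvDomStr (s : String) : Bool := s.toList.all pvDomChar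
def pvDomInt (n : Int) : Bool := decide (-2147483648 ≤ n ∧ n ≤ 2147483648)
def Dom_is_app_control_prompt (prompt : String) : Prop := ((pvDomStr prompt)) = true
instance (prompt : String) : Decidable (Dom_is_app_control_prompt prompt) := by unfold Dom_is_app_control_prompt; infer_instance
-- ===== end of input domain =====

-- B drops A's prefix-stripping loop and nested pattern dict: the result only depends on
-- whether the lowered prompt contains one of the six bare app names (objective: simpler).

-- ===== PORT A =====
def is_app_control_prompt (prompt : String) : Bool :=
  let prompt := PySem.Str.lower prompt
  let prefixes : List String :=
    ["ja", "nee", "ok", "oke", "goed", "prima", "start", "open", "begin", "launch"]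
  let prompt := prefixes.foldl (fun prompt pfx =>
    if PySem.Str.startswith prompt (pfx ++ " ") then
      PySem.Str.slice prompt (some ((PySem.Str.len pfx : Int) + 1)) none
    else prompt) prompt
  let command_patterns : PySem.Dict String (List String) := PySem.Dict.ofList
    [("spotify", ["spotify", "open spotify", "start spotify", "spotify openen"]),
     ("minecraft", ["minecraft", "open minecraft", "start minecraft"]),
     ("fortnite", ["fortnite", "open fortnite", "start fortnite"]),
     ("valorant", ["valorant", "open valorant", "start valorant"]),
     ("brave", ["brave", "open brave", "start brave"]),
     ("youtube", ["youtube", "open youtube", "start youtube"])]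
  (PySem.Dict.values command_patterns).any (fun commands =>
    commands.any (fun cmd => PySem.Str.isIn cmd prompt))

-- ===== PORT B =====
def is_app_control_prompt_alt (prompt : String) : Bool :=
  let p := PySem.Str.lower prompt
  ["spotify", "minecraft", "fortnite", "valorant", "brave", "youtube"].any
    (fun name => PySem.Str.isIn name p)

-- ===== PRECONDITION & SPEC =====
def Spec_is_app_control_prompt (prompt : String) (out : Bool) : Prop := out = is_app_control_prompt_alt prompt
instance (prompt : String) (out : Bool) : Decidable (Spec_is_app_control_prompt prompt out) := by unfold Spec_is_app_control_prompt; infer_instance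

-- ===== CLAIM (what is proved, stated in full; the proofs are below) =====
def Claim_equal_is_app_control_prompt : Prop := ∀ (prompt : String), Dom_is_app_control_prompt prompt → Spec_is_app_control_prompt prompt (is_app_control_prompt prompt)

-- ===== LEMMAS AND PROOFS =====

-- One strip step of A, at the level of character lists.
def pvStripStep (pre s : List Char) : List Char :=
  if PySem.Chars.startswith s (pre ++ [' ']) then s.drop (pre.length + 1) else s

-- Containment of a space-free word is unaffected by removing a leading "prefix ++ space"
-- chunk that does not itself contain the word.
theorem isIn_append_space (n pre s : List Char)
    (hsp : ' ' ∉ n) (hni : ¬ n <:+: (pre ++ [' '])) :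
    PySem.Chars.isIn n ((pre ++ [' ']) ++ s) = PySem.Chars.isIn n s := by
  rw [Bool.eq_iff_iff]
  constructor
  · intro h
    rw [← PySem.Chars.exists_prefix_drop_iff_isIn] at h ⊢
    obtain ⟨j, hj⟩ := h
    by_cases hlt : j < (pre ++ [' ']).length
    · exfalso
      rw [List.drop_append_of_le_length (by omega)] at hj
      set a := (pre ++ [' ']).drop j with ha
      by_cases hlen : n.length ≤ a.length
      · have hna : n <+: a :=
          List.prefix_of_prefix_length_le hj (List.prefix_append a s) hlen
        exact hni (hna.isInfix.trans (List.drop_suffix j _).isInfix)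
      · have han : a <+: n :=
          List.prefix_of_prefix_length_le (List.prefix_append a s) hj (by omega)
        apply hsp
        apply han.sublist.mem
        have hj' : j ≤ pre.length := by
          simp only [List.length_append, List.length_singleton] at hlt; omega
        rw [ha, List.drop_append_of_le_length hj']
        simp
    · refine ⟨j - (pre ++ [' ']).length, ?_⟩
      rw [List.drop_append, List.drop_eq_nil_of_le (by omega)] at hj
      simpa using hj
  · intro h
    rw [← PySem.Chars.exists_prefix_drop_iff_isIn] at h ⊢
    obtain ⟨j, hj⟩ := h
    refine ⟨(pre ++ [' ']).length + j, ?_⟩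
    rw [List.drop_append, List.drop_eq_nil_of_le (by omega)]
    simpa using hj

theorem isIn_stripStep (n pre s : List Char)
    (hsp : ' ' ∉ n) (hni : PySem.Chars.isIn n (pre ++ [' ']) = false) :
    PySem.Chars.isIn n (pvStripStep pre s) = PySem.Chars.isIn n s := by
  unfold pvStripStep
  split
  · rename_i hsw
    obtain ⟨t, ht⟩ := (PySem.Chars.startswith_iff _ _).mp hsw
    subst ht
    have hdrop : ((pre ++ [' ']) ++ t).drop (pre.length + 1) = t := by
      have : pre.length + 1 = (pre ++ [' ']).length := by simp
      rw [this, List.drop_left]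
    rw [hdrop]
    exact (isIn_append_space n pre t hsp ((PySem.Chars.isIn_eq_false_iff _ _).mp hni)).symm
  · rfl

theorem isIn_foldl_strip (n : List Char) (hsp : ' ' ∉ n) :
    ∀ (ps : List (List Char)) (s : List Char),
      (∀ p ∈ ps, PySem.Chars.isIn n (p ++ [' ']) = false) →
      PySem.Chars.isIn n (ps.foldl (fun s p => pvStripStep p s) s) = PySem.Chars.isIn n s := by
  intro ps
  induction ps with
  | nil => intro s _; rfl
  | cons p ps ih =>
    intro s h
    rw [List.foldl_cons, ih _ (fun q hq => h q (List.mem_cons_of_mem _ hq)),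
      isIn_stripStep n p s hsp (h p List.mem_cons_self)]

-- A's whole prefix-stripping loop, at the level of character lists.
def pvStripAll (L : List Char) : List Char :=
  (["ja", "nee", "ok", "oke", "goed", "prima", "start", "open", "begin",
    "launch"].map String.toList).foldl (fun s p => pvStripStep p s) L

-- Stripping never changes containment of any of the six bare app names.
theorem core_eq (L : List Char) :
    ∀ n ∈ (["spotify", "minecraft", "fortnite", "valorant", "brave", "youtube"] :
        List String),
      PySem.Chars.isIn n.toList (pvStripAll L) = PySem.Chars.isIn n.toList L := by
  intro n hn
  apply isIn_foldl_strip
  · fin_cases hn <;> decide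
  · intro p hp
    fin_cases hn <;> fin_cases hp <;> decide

-- Bridge: A's Str-level strip step equals pvStripStep on toList.
theorem step_toList (q p : String) :
    (if PySem.Str.startswith p (q ++ " ") then
        PySem.Str.slice p (some ((PySem.Str.len q : Int) + 1)) none
      else p).toList = pvStripStep q.toList p.toList := by
  unfold pvStripStep
  have hsw : PySem.Str.startswith p (q ++ " ") =
      PySem.Chars.startswith p.toList (q.toList ++ [' ']) := by
    simp [PySem.Str.startswith_eq]
  rw [hsw]
  split
  · simp only [PySem.Str.toList_slice, PySem.Chars.slice_eq_listSlice]
    have h1 : ((PySem.Str.len q) + 1 : Int) = ((q.toList.length + 1 : Nat) : Int) := by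
      rw [PySem.Str.len_eq]; push_cast; ring
    rw [h1, PySem.List.slice_from_natCast]
  · rfl

-- Bridge: A's Str-level prefix loop equals pvStripAll on toList.
theorem fold_toList (s : String) :
    ((["ja", "nee", "ok", "oke", "goed", "prima", "start", "open", "begin",
        "launch"] : List String).foldl (fun prompt pfx =>
      if PySem.Str.startswith prompt (pfx ++ " ") then
        PySem.Str.slice prompt (some ((PySem.Str.len pfx : Int) + 1)) none
      else prompt) s).toList = pvStripAll s.toList := by
  simp only [pvStripAll, List.map_cons, List.map_nil, List.foldl_cons, List.foldl_nil,
    step_toList]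

-- The core equality on character lists: A's pattern check over the stripped string
-- equals B's bare-name check over the original string.
theorem main_chars (L : List Char) :
    ([["spotify", "open spotify", "start spotify", "spotify openen"],
      ["minecraft", "open minecraft", "start minecraft"],
      ["fortnite", "open fortnite", "start fortnite"],
      ["valorant", "open valorant", "start valorant"],
      ["brave", "open brave", "start brave"],
      ["youtube", "open youtube", "start youtube"]] : List (List String)).any
        (fun commands => commands.any
          (fun cmd => PySem.Chars.isIn cmd.toList (pvStripAll L)))
    = (["spotify", "minecraft", "fortnite", "valorant", "brave", "youtube"] :
        List String).any (fun name => PySem.Chars.isIn name.toList L) := by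
  have key : ∀ (name cmd : String),
      name ∈ (["spotify", "minecraft", "fortnite", "valorant", "brave", "youtube"] :
        List String) →
      name.toList <:+: cmd.toList →
      PySem.Chars.isIn cmd.toList (pvStripAll L) = true →
      ∃ n ∈ (["spotify", "minecraft", "fortnite", "valorant", "brave", "youtube"] :
        List String), PySem.Chars.isIn n.toList L = true := by
    intro name cmd hmem hinf hc
    refine ⟨name, hmem, ?_⟩
    rw [← core_eq L name hmem]
    exact (PySem.Chars.isIn_iff_infix _ _).mpr
      (hinf.trans ((PySem.Chars.isIn_iff_infix _ _).mp hc))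
  rw [Bool.eq_iff_iff]
  simp only [List.any_eq_true]
  constructor
  · rintro ⟨commands, hcs, cmd, hcmd, hc⟩
    fin_cases hcs <;> fin_cases hcmd <;>
      first
        | exact key "spotify" _ (by decide) (by decide) hc
        | exact key "minecraft" _ (by decide) (by decide) hc
        | exact key "fortnite" _ (by decide) (by decide) hc
        | exact key "valorant" _ (by decide) (by decide) hc
        | exact key "brave" _ (by decide) (by decide) hc
        | exact key "youtube" _ (by decide) (by decide) hc
  · rintro ⟨n, hn, hisin⟩
    have h2 : PySem.Chars.isIn n.toList (pvStripAll L) = true := by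
      rw [core_eq L n hn]; exact hisin
    fin_cases hn
    · exact ⟨["spotify", "open spotify", "start spotify", "spotify openen"],
        by decide, "spotify", by decide, h2⟩
    · exact ⟨["minecraft", "open minecraft", "start minecraft"],
        by decide, "minecraft", by decide, h2⟩
    · exact ⟨["fortnite", "open fortnite", "start fortnite"],
        by decide, "fortnite", by decide, h2⟩
    · exact ⟨["valorant", "open valorant", "start valorant"],
        by decide, "valorant", by decide, h2⟩
    · exact ⟨["brave", "open brave", "start brave"],
        by decide, "brave", by decide, h2⟩
    · exact ⟨["youtube", "open youtube", "start youtube"],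
        by decide, "youtube", by decide, h2⟩

theorem values_eval :
    PySem.Dict.values (PySem.Dict.ofList
      ([("spotify", ["spotify", "open spotify", "start spotify", "spotify openen"]),
        ("minecraft", ["minecraft", "open minecraft", "start minecraft"]),
        ("fortnite", ["fortnite", "open fortnite", "start fortnite"]),
        ("valorant", ["valorant", "open valorant", "start valorant"]),
        ("brave", ["brave", "open brave", "start brave"]),
        ("youtube", ["youtube", "open youtube", "start youtube"])] :
        List (String × List String)))
    = [["spotify", "open spotify", "start spotify", "spotify openen"],
       ["minecraft", "open minecraft", "start minecraft"],
       ["fortnite", "open fortnite", "start fortnite"],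
       ["valorant", "open valorant", "start valorant"],
       ["brave", "open brave", "start brave"],
       ["youtube", "open youtube", "start youtube"]] := by
  decide

-- ===== VERDICT (by name: the statement is the Claim_ definition above) =====
theorem is_app_control_prompt_spec : Claim_equal_is_app_control_prompt := by
  intro prompt _
  unfold Spec_is_app_control_prompt is_app_control_prompt is_app_control_prompt_alt
  simp only [values_eval, PySem.Str.isIn_eq, fold_toList]
  exact main_chars ((PySem.Str.lower prompt).toList)
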